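-- pv_equiv track=rewrite | github.com/hy54321/DM_Helper_MCP | mcp_server.py | _resolve_single_mapping
-- ===== SOURCE A (Python) =====
-- from typing import Any, Dict, List, Optional
--
-- def _resolve_single_mapping(field_name: str, mappings: List[Dict[str, str]]) -> Optional[Dict[str, str]]:
--     field_name = field_name.strip()
--     if not field_name:
--         return None
--
--     exact_source = [m for m in mappings if m["source_field"] == field_name]
--     if len(exact_source) == 1:
--         return exact_source[0]
--
--     exact_target = [m for m in mappings if m["target_field"] == field_name]
--     if len(exact_target) == 1:
--         return exact_target[0]
--
--     lookup = field_name.lower()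
--     ci_source = [m for m in mappings if m["source_field"].lower() == lookup]
--     if len(ci_source) == 1:
--         return ci_source[0]
--
--     ci_target = [m for m in mappings if m["target_field"].lower() == lookup]
--     if len(ci_target) == 1:
--         return ci_target[0]
--
--     return None
-- ===== SOURCE B (Python) =====
-- from typing import Dict, List, Optional
--
-- def _resolve_single_mapping(field_name: str, mappings: List[Dict[str, str]]) -> Optional[Dict[str, str]]:
--     field_name = field_name.strip()
--     if not field_name:
--         return None
--     lookup = field_name.lower()
--
--     # one pass; for each category keep (match count, first matching mapping)
--     es_n = et_n = cs_n = ct_n = 0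
--     es_m = et_m = cs_m = ct_m = None
--     for m in mappings:
--         s = m["source_field"]
--         t = m["target_field"]
--         if s == field_name:
--             es_n += 1
--             if es_m is None:
--                 es_m = m
--         if t == field_name:
--             et_n += 1
--             if et_m is None:
--                 et_m = m
--         if s.lower() == lookup:
--             cs_n += 1
--             if cs_m is None:
--                 cs_m = m
--         if t.lower() == lookup:
--             ct_n += 1
--             if ct_m is None:
--                 ct_m = m
--
--     if es_n == 1:
--         return es_m
--     if et_n == 1:
--         return et_m
--     if cs_n == 1:
--         return cs_m
--     if ct_n == 1:
--         return ct_m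
--     return None
-- ===== Notes on version B (the rewrite author's own statement) =====
-- stated objective: alternative
-- what changed: Replaces A's four separate list-comprehension scans over mappings with a single pass maintaining a (count, first-match) accumulator per category, then tests the four priority conditions in order.
-- outside the precondition, e.g. on _resolve_single_mapping('a', [{'source_field': 'a'}]): A returns {'source_field': 'a'}, B raises KeyError
import Mathlib
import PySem

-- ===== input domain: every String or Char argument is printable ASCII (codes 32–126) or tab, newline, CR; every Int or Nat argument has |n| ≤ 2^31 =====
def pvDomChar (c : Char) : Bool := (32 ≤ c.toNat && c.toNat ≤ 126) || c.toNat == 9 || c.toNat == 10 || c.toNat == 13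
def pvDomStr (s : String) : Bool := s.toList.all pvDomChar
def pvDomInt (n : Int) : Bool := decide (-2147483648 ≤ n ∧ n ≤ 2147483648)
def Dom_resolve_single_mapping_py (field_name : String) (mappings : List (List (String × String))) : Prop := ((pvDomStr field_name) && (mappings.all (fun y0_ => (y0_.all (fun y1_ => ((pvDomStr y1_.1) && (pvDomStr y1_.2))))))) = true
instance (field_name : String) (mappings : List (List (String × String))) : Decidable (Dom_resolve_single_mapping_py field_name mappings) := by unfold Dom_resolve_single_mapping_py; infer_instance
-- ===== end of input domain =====

-- B makes ONE pass over `mappings`, maintaining a (count, first-match) accumulator for each of the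
-- four categories, instead of A's four separate comprehension scans.  Return value only; exact on Pre_.

-- ===== PORT A =====
-- m["source_field"] / m["target_field"]; Pre_ guarantees the key is present, so getD "" is exact there
def pvSrc (m : List (String × String)) : String := (PySem.Dict.get? (PySem.Dict.mk m) "source_field").getD ""
def pvTgt (m : List (String × String)) : String := (PySem.Dict.get? (PySem.Dict.mk m) "target_field").getD ""

def resolve_single_mapping_py (field_name : String) (mappings : List (List (String × String))) : Option (List (String × String)) :=
  let fn := PySem.Str.strip field_name
  if fn = "" then none
  else
    let exact_source := mappings.filter (fun m => pvSrc m == fn)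
    if exact_source.length = 1 then PySem.List.pyGet? exact_source 0
    else
      let exact_target := mappings.filter (fun m => pvTgt m == fn)
      if exact_target.length = 1 then PySem.List.pyGet? exact_target 0
      else
        let lookup := PySem.Str.lower fn
        let ci_source := mappings.filter (fun m => PySem.Str.lower (pvSrc m) == lookup)
        if ci_source.length = 1 then PySem.List.pyGet? ci_source 0
        else
          let ci_target := mappings.filter (fun m => PySem.Str.lower (pvTgt m) == lookup)
          if ci_target.length = 1 then PySem.List.pyGet? ci_target 0
          else none

-- ===== PORT B =====
-- one category accumulator: (count, first match); bump = count += 1, keep first match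
def pvBump (st : Nat × Option (List (String × String))) (m : List (String × String)) :
    Nat × Option (List (String × String)) :=
  (st.1 + 1, some (st.2.getD m))

-- one loop iteration of B: update all four accumulators from mapping m
def pvStep (fn lookup : String) (st : (Nat × Option (List (String × String))) × (Nat × Option (List (String × String))) × (Nat × Option (List (String × String))) × (Nat × Option (List (String × String)))) (m : List (String × String)) :
    (Nat × Option (List (String × String))) × (Nat × Option (List (String × String))) × (Nat × Option (List (String × String))) × (Nat × Option (List (String × String))) :=
  let s := pvSrc m
  let t := pvTgt m
  ((if s == fn then pvBump st.1 m else st.1),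
   (if t == fn then pvBump st.2.1 m else st.2.1),
   (if PySem.Str.lower s == lookup then pvBump st.2.2.1 m else st.2.2.1),
   (if PySem.Str.lower t == lookup then pvBump st.2.2.2 m else st.2.2.2))

def resolve_single_mapping_py_alt (field_name : String) (mappings : List (List (String × String))) : Option (List (String × String)) :=
  let fn := PySem.Str.strip field_name
  if fn = "" then none
  else
    let lookup := PySem.Str.lower fn
    let st := mappings.foldl (pvStep fn lookup) ((0, none), (0, none), (0, none), (0, none))
    if st.1.1 = 1 then st.1.2
    else if st.2.1.1 = 1 then st.2.1.2
    else if st.2.2.1.1 = 1 then st.2.2.1.2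
    else if st.2.2.2.1 = 1 then st.2.2.2.2
    else none

-- ===== PRECONDITION & SPEC =====
-- Pre_: unless the stripped field name is empty (then neither program touches the mappings),
-- every mapping must carry both keys; A raises KeyError on the first mapping missing "source_field"
-- (and on a missing "target_field" whenever it reaches that scan), and B, which reads both keys of
-- every mapping in its single pass, itself raises KeyError on every excluded input — including the
-- corner inputs where A's lazy later scans let it return a value.
def Pre_resolve_single_mapping_py (field_name : String) (mappings : List (List (String × String))) : Prop :=
  PySem.Str.strip field_name ≠ "" →
  ∀ m ∈ mappings, (PySem.Dict.get? (PySem.Dict.mk m) "source_field").isSome ∧ (PySem.Dict.get? (PySem.Dict.mk m) "target_field").isSome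
instance (field_name : String) (mappings : List (List (String × String))) : Decidable (Pre_resolve_single_mapping_py field_name mappings) := by unfold Pre_resolve_single_mapping_py; infer_instance

def pvWitness_resolve_single_mapping_py : String × (List (List (String × String))) :=
  ("a", [[("source_field", "a"), ("target_field", "b")]])

def Spec_resolve_single_mapping_py (field_name : String) (mappings : List (List (String × String))) (out : Option (List (String × String))) : Prop := out = resolve_single_mapping_py_alt field_name mappings
instance (field_name : String) (mappings : List (List (String × String))) (out : Option (List (String × String))) : Decidable (Spec_resolve_single_mapping_py field_name mappings out) := by unfold Spec_resolve_single_mapping_py; infer_instance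

-- ===== CLAIM (what is proved, stated in full; the proofs are below) =====
def Claim_equal_resolve_single_mapping_py : Prop := ∀ (field_name : String) (mappings : List (List (String × String))), Dom_resolve_single_mapping_py field_name mappings → Pre_resolve_single_mapping_py field_name mappings → Spec_resolve_single_mapping_py field_name mappings (resolve_single_mapping_py field_name mappings)

-- ===== LEMMAS AND PROOFS =====

-- closed form of one accumulator after folding the rest of the list
def pvAcc (p : List (String × String) → Bool) (l : List (List (String × String)))
    (st : Nat × Option (List (String × String))) : Nat × Option (List (String × String)) :=
  (st.1 + (l.filter p).length, st.2.or ((l.filter p).head?))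

theorem pvAcc_cons (p : List (String × String) → Bool) (hd : List (String × String))
    (l : List (List (String × String))) (st : Nat × Option (List (String × String))) :
    pvAcc p (hd :: l) st = pvAcc p l (if p hd then pvBump st hd else st) := by
  by_cases h : p hd
  · cases st with
    | mk c o =>
      cases o <;> simp [pvAcc, pvBump, h, Option.or] <;> omega
  · simp [pvAcc, h]

theorem pvFold_eq (fn lookup : String) (l : List (List (String × String)))
    (a b c d : Nat × Option (List (String × String))) :
    l.foldl (pvStep fn lookup) (a, b, c, d) =
      (pvAcc (fun m => pvSrc m == fn) l a,
       pvAcc (fun m => pvTgt m == fn) l b,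
       pvAcc (fun m => PySem.Str.lower (pvSrc m) == lookup) l c,
       pvAcc (fun m => PySem.Str.lower (pvTgt m) == lookup) l d) := by
  induction l generalizing a b c d with
  | nil => simp [pvAcc]
  | cons hd tl ih =>
      rw [List.foldl_cons, pvAcc_cons, pvAcc_cons, pvAcc_cons, pvAcc_cons, pvStep, ih]

theorem pvGet0_of_len1 (l : List (List (String × String))) (h : l.length = 1) :
    PySem.List.pyGet? l 0 = l.head? := by
  match l, h with
  | [x], _ => rfl

-- ===== VERDICT (by name: the statement is the Claim_ definition above) =====
theorem resolve_single_mapping_py_spec : Claim_equal_resolve_single_mapping_py := by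
  intro field_name mappings _ _
  unfold Spec_resolve_single_mapping_py resolve_single_mapping_py resolve_single_mapping_py_alt
  by_cases h0 : PySem.Str.strip field_name = ""
  · simp [h0]
  · simp only [h0, if_false]
    rw [pvFold_eq]
    simp only [pvAcc, Nat.zero_add, Option.none_or]
    by_cases h1 : (mappings.filter (fun m => pvSrc m == PySem.Str.strip field_name)).length = 1
    · rw [if_pos h1, if_pos h1]; exact pvGet0_of_len1 _ h1
    · rw [if_neg h1, if_neg h1]
      by_cases h2 : (mappings.filter (fun m => pvTgt m == PySem.Str.strip field_name)).length = 1
      · rw [if_pos h2, if_pos h2]; exact pvGet0_of_len1 _ h2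
      · rw [if_neg h2, if_neg h2]
        by_cases h3 : (mappings.filter (fun m => PySem.Str.lower (pvSrc m) == PySem.Str.lower (PySem.Str.strip field_name))).length = 1
        · rw [if_pos h3, if_pos h3]; exact pvGet0_of_len1 _ h3
        · rw [if_neg h3, if_neg h3]
          by_cases h4 : (mappings.filter (fun m => PySem.Str.lower (pvTgt m) == PySem.Str.lower (PySem.Str.strip field_name))).length = 1
          · rw [if_pos h4, if_pos h4]; exact pvGet0_of_len1 _ h4
          · rw [if_neg h4, if_neg h4]
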